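-- pv_equiv track=rewrite | github.com/eurecom-s3/mmushell | architectures/arm.py | aggregate_frames
-- ===== SOURCE A (Python) =====
-- def aggregate_frames(frames, frame_size, page_size):
--     pages = []
--     frame_per_page = int(page_size // frame_size)
--     frames = set(frames)
--
--     for frame_addr in frames:
--         if frame_addr % page_size != 0:
--             continue
--
--         if all(
--             [
--                 (frame_addr + idx * frame_size) in frames
--                 for idx in range(1, frame_per_page)
--             ]
--         ):
--             pages.append(frame_addr)
--
--     return pages
-- ===== SOURCE B (Python) =====
-- def aggregate_frames(frames, frame_size, page_size):
--     frame_per_page = int(page_size // frame_size)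
--     frames = set(frames)
--
--     # one pass: count, for each page base, how many exact sub-frame slots
--     # (index 1 .. frame_per_page-1) are present
--     counts = {}
--     for addr in frames:
--         off = addr % page_size
--         if off != 0 and off % frame_size == 0:
--             idx = off // frame_size
--             if 1 <= idx < frame_per_page:
--                 base = addr - off
--                 counts[base] = counts.get(base, 0) + 1
--
--     needed = max(frame_per_page - 1, 0)
--     return [
--         addr
--         for addr in frames
--         if addr % page_size == 0 and counts.get(addr, 0) == needed
--     ]
-- ===== Notes on version B (the rewrite author's own statement) =====
-- stated objective: alternative
-- what changed: Replaces A's per-candidate membership scan over the frame_per_page-1 sub-frame slots by a single counting pass that buckets each frame under its page base, then emits aligned frames whose bucket count is full; trades the inner range scan for per-frame divmod arithmetic (not measurably faster on the tested inputs).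
import Mathlib
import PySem

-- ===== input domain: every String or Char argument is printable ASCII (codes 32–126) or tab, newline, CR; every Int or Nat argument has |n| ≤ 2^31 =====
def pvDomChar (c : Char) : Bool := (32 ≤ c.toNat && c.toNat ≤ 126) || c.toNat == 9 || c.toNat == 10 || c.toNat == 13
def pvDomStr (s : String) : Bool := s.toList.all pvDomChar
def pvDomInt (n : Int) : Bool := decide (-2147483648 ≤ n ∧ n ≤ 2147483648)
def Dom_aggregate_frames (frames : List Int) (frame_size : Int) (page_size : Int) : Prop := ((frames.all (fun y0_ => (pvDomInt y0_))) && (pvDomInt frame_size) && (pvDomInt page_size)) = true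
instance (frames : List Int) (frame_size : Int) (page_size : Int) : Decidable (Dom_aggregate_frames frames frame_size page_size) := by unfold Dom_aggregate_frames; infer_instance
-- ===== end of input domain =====

-- B replaces A's per-candidate scan of all frame_per_page-1 sub-frame slots by a single
-- counting pass over the frames (a per-page-base counter dictionary); same return value.

-- ===== PORT A =====
def aggregate_frames (frames : List Int) (frame_size : Int) (page_size : Int) : List Int :=
  let frame_per_page := PySem.Int.floordiv page_size frame_size
  let S : PySem.Set Int := PySem.Set.ofList frames
  S.foldl (fun pages frame_addr =>
    if PySem.Int.mod frame_addr page_size ≠ 0 then pages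
    else
      if ((PySem.List.pyRange 1 frame_per_page 1).map
            (fun idx => PySem.Set.contains S (frame_addr + idx * frame_size))).all id then
        pages ++ [frame_addr]
      else pages) []

-- ===== PORT B =====
def aggregate_frames_alt (frames : List Int) (frame_size : Int) (page_size : Int) : List Int :=
  let frame_per_page := PySem.Int.floordiv page_size frame_size
  let S : PySem.Set Int := PySem.Set.ofList frames
  let counts : PySem.Dict Int Int := S.foldl (fun d addr =>
      let off := PySem.Int.mod addr page_size
      if off ≠ 0 ∧ PySem.Int.mod off frame_size = 0 then
        let idx := PySem.Int.floordiv off frame_size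
        if 1 ≤ idx ∧ idx < frame_per_page then
          d.insert (addr - off) (d.getD (addr - off) 0 + 1)
        else d
      else d) PySem.Dict.empty
  let needed := max (frame_per_page - 1) 0
  S.filter (fun addr =>
    decide (PySem.Int.mod addr page_size = 0 ∧ counts.getD addr 0 = needed))

-- ===== PRECONDITION & SPEC =====
-- Pre_ excludes exactly the inputs where A raises ZeroDivisionError:
-- frame_size == 0 (page_size // frame_size), or page_size == 0 with frames nonempty
-- (frame_addr % page_size inside the loop).
def Pre_aggregate_frames (frames : List Int) (frame_size : Int) (page_size : Int) : Prop :=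
  frame_size ≠ 0 ∧ (frames = [] ∨ page_size ≠ 0)
instance (frames : List Int) (frame_size : Int) (page_size : Int) : Decidable (Pre_aggregate_frames frames frame_size page_size) := by unfold Pre_aggregate_frames; infer_instance

def pvWitness_aggregate_frames : List Int × Int × Int := ([0, 4, 8], 4, 8)

def Spec_aggregate_frames (frames : List Int) (frame_size : Int) (page_size : Int) (out : List Int) : Prop := out = aggregate_frames_alt frames frame_size page_size
instance (frames : List Int) (frame_size : Int) (page_size : Int) (out : List Int) : Decidable (Spec_aggregate_frames frames frame_size page_size out) := by unfold Spec_aggregate_frames; infer_instance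

-- ===== CLAIM (what is proved, stated in full; the proofs are below) =====
def Claim_equal_aggregate_frames : Prop := ∀ (frames : List Int) (frame_size : Int) (page_size : Int), Dom_aggregate_frames frames frame_size page_size → Pre_aggregate_frames frames frame_size page_size → Spec_aggregate_frames frames frame_size page_size (aggregate_frames frames frame_size page_size)

-- ===== LEMMAS AND PROOFS =====

-- Python fmod lands in [0, m) for m > 0 and in (m, 0] for m < 0.
theorem pv_fmod_bounds (a m : Int) (hm : m ≠ 0) :
    (0 < m ∧ 0 ≤ Int.fmod a m ∧ Int.fmod a m < m) ∨
    (m < 0 ∧ m < Int.fmod a m ∧ Int.fmod a m ≤ 0) := by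
  have hr0 : 0 ≤ a % m := Int.emod_nonneg a hm
  have hdvd : a % m = 0 ↔ m ∣ a := ⟨Int.dvd_of_emod_eq_zero, Int.emod_eq_zero_of_dvd⟩
  rcases lt_or_gt_of_ne hm with h | h
  · right
    have hrlt : a % m < -m := by
      have := Int.emod_lt_of_pos a (b := -m) (by omega)
      rwa [Int.emod_neg] at this
    rw [Int.fmod_eq_emod]
    split_ifs with hif
    · rcases hif with h' | h'
      · omega
      · have : a % m = 0 := hdvd.mpr h'
        omega
    · have hnd : ¬ m ∣ a := by tauto
      have : a % m ≠ 0 := fun h0 => hnd (hdvd.mp h0)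
      omega
  · left
    have hrlt : a % m < m := Int.emod_lt_of_pos a h
    rw [Int.fmod_eq_emod]
    split_ifs with hif
    · omega
    · omega

-- Uniqueness of floor quotient/remainder.
theorem pv_fmod_unique (a q r m : Int) (hm : m ≠ 0) (h : a = q * m + r)
    (hr : (0 ≤ r ∧ r < m) ∨ (m < r ∧ r ≤ 0)) :
    Int.fmod a m = r := by
  have hfd := Int.fmod_add_mul_fdiv a m
  set d := Int.fdiv a m with hd
  have key : (q - d) * m = Int.fmod a m - r := by nlinarith [hfd, h]
  have hb := pv_fmod_bounds a m hm
  by_cases hqd : q = d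
  · subst hqd
    nlinarith [key]
  · have h1 : q - d ≥ 1 ∨ q - d ≤ -1 := by omega
    rcases hb with ⟨hm', hb1, hb2⟩ | ⟨hm', hb1, hb2⟩ <;>
      rcases hr with ⟨hr1, hr2⟩ | ⟨hr1, hr2⟩ <;>
      rcases h1 with h1 | h1 <;> nlinarith [key]

theorem pv_fmod_shift (a t m : Int) (hm : m ≠ 0) (ha : Int.fmod a m = 0)
    (ht : (0 < t ∧ t < m) ∨ (m < t ∧ t < 0)) : Int.fmod (a + t) m = t := by
  have hfd := Int.fmod_add_mul_fdiv a m
  exact pv_fmod_unique (a + t) (Int.fdiv a m) t m hm (by linarith [hfd]) (by omega)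

-- 1 ≤ idx < ps//fs places idx*fs strictly between 0 and ps.
theorem pv_idx_window (fs ps idx : Int) (hfs : fs ≠ 0)
    (h1 : 1 ≤ idx) (h2 : idx < Int.fdiv ps fs) :
    (0 < idx * fs ∧ idx * fs < ps) ∨ (ps < idx * fs ∧ idx * fs < 0) := by
  have hfd := Int.fmod_add_mul_fdiv ps fs
  have hb := pv_fmod_bounds ps fs hfs
  rcases lt_or_gt_of_ne hfs with h | h
  · right
    rcases hb with ⟨hm', _, _⟩ | ⟨_, hb1, hb2⟩
    · omega
    constructor <;> nlinarith
  · left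
    rcases hb with ⟨_, hb1, hb2⟩ | ⟨hm', _, _⟩
    · constructor <;> nlinarith
    · omega

-- Core arithmetic: B's record condition with base a ⟺ b is one of A's scanned sub-frames of a.
theorem pv_mem_iff (fs ps a b : Int) (hfs : fs ≠ 0) (hps : ps ≠ 0)
    (ha : Int.fmod a ps = 0) :
    (Int.fmod b ps ≠ 0 ∧ Int.fmod (Int.fmod b ps) fs = 0 ∧
       1 ≤ Int.fdiv (Int.fmod b ps) fs ∧ Int.fdiv (Int.fmod b ps) fs < Int.fdiv ps fs ∧
       b - Int.fmod b ps = a)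
    ↔ ∃ idx, (1 ≤ idx ∧ idx < Int.fdiv ps fs) ∧ b = a + idx * fs := by
  constructor
  · rintro ⟨hne, hdv, hlo, hhi, hbase⟩
    refine ⟨Int.fdiv (Int.fmod b ps) fs, ⟨hlo, hhi⟩, ?_⟩
    have := Int.fmod_add_mul_fdiv (Int.fmod b ps) fs
    have hoff : Int.fmod b ps = Int.fdiv (Int.fmod b ps) fs * fs := by linarith
    omega
  · rintro ⟨idx, ⟨hlo, hhi⟩, rfl⟩
    have hwin := pv_idx_window fs ps idx hfs hlo hhi
    have hmod : Int.fmod (a + idx * fs) ps = idx * fs := pv_fmod_shift a (idx * fs) ps hps ha hwin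
    have hdv : Int.fmod (idx * fs) fs = 0 := by
      exact pv_fmod_unique (idx * fs) idx 0 fs hfs (by ring) (by rcases lt_or_gt_of_ne hfs with h | h <;> omega)
    have hfd : Int.fdiv (idx * fs) fs = idx := Int.mul_fdiv_cancel idx hfs
    refine ⟨by omega, by rw [hmod]; exact hdv, by rw [hmod, hfd]; exact hlo, by rw [hmod, hfd]; exact hhi, by omega⟩

-- The counter built by B's pass, read at an aligned address a, counts exactly the
-- present sub-frames of a's page.
theorem pv_count_eq (fs ps a : Int) (S : List Int) (hfs : fs ≠ 0) (hps : ps ≠ 0)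
    (hnd : S.Nodup) (ha : Int.fmod a ps = 0) :
    (S.foldl (fun d addr =>
        if Int.fmod addr ps ≠ 0 ∧ Int.fmod (Int.fmod addr ps) fs = 0 then
          if 1 ≤ Int.fdiv (Int.fmod addr ps) fs ∧ Int.fdiv (Int.fmod addr ps) fs < Int.fdiv ps fs then
            d.insert (addr - Int.fmod addr ps) (d.getD (addr - Int.fmod addr ps) 0 + 1)
          else d
        else d) PySem.Dict.empty).getD a 0
    = (((PySem.List.pyRange 1 (Int.fdiv ps fs) 1).filter
          (fun idx => decide (a + idx * fs ∈ S))).length : Int) := by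
  refine Eq.trans (congrArg (fun d => PySem.Dict.getD d a 0)
    (PySem.List.foldl_congr_mem (l := S) _ (fun d addr =>
        if (Int.fmod addr ps ≠ 0 ∧ Int.fmod (Int.fmod addr ps) fs = 0 ∧
              1 ≤ Int.fdiv (Int.fmod addr ps) fs ∧ Int.fdiv (Int.fmod addr ps) fs < Int.fdiv ps fs) then
          d.insert (addr - Int.fmod addr ps) (d.getD (addr - Int.fmod addr ps) 0 + 1)
        else d) _ (by intro acc x _; dsimp only; split_ifs <;> tauto))) ?_
  dsimp only
  rw [PySem.List.foldl_ite_eq_foldl_filter]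
  rw [← List.foldl_map (f := fun addr => addr - Int.fmod addr ps)
        (g := fun (d : PySem.Dict Int Int) (x : Int) => d.insert x (d.getD x 0 + 1))]
  rw [PySem.Dict.getD_foldl_insert_add_one]
  rw [PySem.Dict.getD_empty]
  have hperm : ((S.filter (fun addr => decide (Int.fmod addr ps ≠ 0 ∧ Int.fmod (Int.fmod addr ps) fs = 0 ∧
              1 ≤ Int.fdiv (Int.fmod addr ps) fs ∧ Int.fdiv (Int.fmod addr ps) fs < Int.fdiv ps fs ∧
              addr - Int.fmod addr ps = a))).Perm
      (((PySem.List.pyRange 1 (Int.fdiv ps fs) 1).filter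
          (fun idx => decide (a + idx * fs ∈ S))).map (fun idx => a + idx * fs))) := by
    apply (List.perm_ext_iff_of_nodup (hnd.filter _) ?_).mpr
    · intro x
      simp only [List.mem_filter, List.mem_map, decide_eq_true_eq]
      constructor
      · rintro ⟨hxS, hC⟩
        rcases (pv_mem_iff fs ps a x hfs hps ha).mp hC with ⟨idx, hb, rfl⟩
        exact ⟨idx, ⟨by simpa [PySem.List.mem_pyRange_one] using hb, by exact hxS⟩, rfl⟩
      · rintro ⟨idx, ⟨hr, hmem⟩, rfl⟩
        rw [PySem.List.mem_pyRange_one] at hr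
        exact ⟨hmem, (pv_mem_iff fs ps a _ hfs hps ha).mpr ⟨idx, hr, rfl⟩⟩
    · apply List.Nodup.map
      · intro x y hxy
        simp only at hxy
        have h2 : x * fs = y * fs := by linarith
        exact mul_right_cancel₀ hfs h2
      · exact (PySem.List.nodup_pyRange_one 1 (Int.fdiv ps fs)).filter _
  have hlen := hperm.length_eq
  rw [List.length_map] at hlen
  rw [← hlen]
  rw [List.count_eq_countP, List.countP_map, List.countP_filter,
    ← List.countP_eq_length_filter]
  rw [zero_add]
  congr 1
  apply List.countP_congr
  intro addr _
  simp only [Function.comp, Bool.and_eq_true, beq_iff_eq, decide_eq_true_eq]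
  tauto

-- A's result is a filter of the set, B's too, and the two filter tests agree.
theorem pv_main (frames : List Int) (fs ps : Int) (hfs : fs ≠ 0) (hps : ps ≠ 0) :
    aggregate_frames frames fs ps = aggregate_frames_alt frames fs ps := by
  unfold aggregate_frames aggregate_frames_alt
  simp only [PySem.Int.mod, PySem.Int.floordiv]
  set S : PySem.Set Int := PySem.Set.ofList frames with hS
  have hnd : S.Nodup := PySem.Set.nodup_ofList frames
  have hA : S.foldl (fun pages frame_addr =>
      if Int.fmod frame_addr ps ≠ 0 then pages
      else if ((PySem.List.pyRange 1 (Int.fdiv ps fs) 1).map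
            (fun idx => PySem.Set.contains S (frame_addr + idx * fs))).all id then
        pages ++ [frame_addr] else pages) []
      = S.filter (fun b => decide (Int.fmod b ps = 0) &&
          ((PySem.List.pyRange 1 (Int.fdiv ps fs) 1).map
            (fun idx => PySem.Set.contains S (b + idx * fs))).all id) := by
    rw [PySem.List.foldl_congr_mem (g := fun pages b =>
        if (decide (Int.fmod b ps = 0) &&
          ((PySem.List.pyRange 1 (Int.fdiv ps fs) 1).map
            (fun idx => PySem.Set.contains S (b + idx * fs))).all id) then pages ++ [b] else pages)]
    · rw [PySem.List.foldl_append_if_eq_filter]; simp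
    · intro acc b _
      by_cases hb : Int.fmod b ps = 0 <;> simp [hb]
  refine hA.trans ?_
  apply List.filter_congr
  intro b hbS
  by_cases hb : Int.fmod b ps = 0
  · have hcount := pv_count_eq fs ps b S hfs hps hnd hb
    rw [Bool.eq_iff_iff]
    simp only [Bool.and_eq_true, decide_eq_true_eq, List.all_map, List.all_eq_true,
      Function.comp]
    rw [hcount]
    have hfle : ((PySem.List.pyRange 1 (Int.fdiv ps fs) 1).filter
        (fun idx => decide (b + idx * fs ∈ S))).length ≤ (PySem.List.pyRange 1 (Int.fdiv ps fs) 1).length :=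
      List.length_filter_le _ _
    have hrl : (PySem.List.pyRange 1 (Int.fdiv ps fs) 1).length = (Int.fdiv ps fs - 1).toNat :=
      PySem.List.length_pyRange_one 1 (Int.fdiv ps fs)
    constructor
    · rintro ⟨-, hall⟩
      refine ⟨hb, ?_⟩
      have : ((PySem.List.pyRange 1 (Int.fdiv ps fs) 1).filter
          (fun idx => decide (b + idx * fs ∈ S))) = (PySem.List.pyRange 1 (Int.fdiv ps fs) 1) := by
        apply List.filter_eq_self.mpr
        intro idx hidx
        simpa using hall idx hidx
      rw [this, hrl]
      omega
    · rintro ⟨-, hlen⟩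
      refine ⟨hb, ?_⟩
      intro idx hidx
      have hall : ∀ x ∈ PySem.List.pyRange 1 (Int.fdiv ps fs) 1, decide (b + x * fs ∈ S) = true := by
        apply List.length_filter_eq_length_iff.mp
        omega
      have := hall idx hidx
      simpa using this
  · simp [hb]

-- ===== VERDICT (by name: the statement is the Claim_ definition above) =====
theorem aggregate_frames_spec : Claim_equal_aggregate_frames := by
  intro frames fs ps _ hpre
  rcases hpre with ⟨hfs, hor⟩
  unfold Spec_aggregate_frames
  rcases hor with hnil | hps
  · subst hnil; rfl
  · exact pv_main frames fs ps hfs hps
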